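-- pv_equiv track=rewrite | github.com/hbwzhsh/AI-Chatbot | Backend/ParseData.py | sentence_to_index
-- ===== SOURCE A (Python) =====
-- def sentence_to_index(sentence, word_to_index):
--     # result = [word_to_index["<GO>"]]
--     result = []
--     length = 0
--     for word in sentence:
--         length += 1
--         if word in word_to_index:
--             result.append(word_to_index[word])
--         else:
--             result.append(word_to_index["<UNK>"])
--
--     # max sequence length of 25
--     if len(result) < 24:  # last one will always be eos
--         # TODO: maybe try removing eos?
--         result.append(word_to_index["<EOS>"])
--         result.extend([word_to_index["<PAD>"]] * (25 - len(result)))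
--     else:
--         result = result[:24]
--         result.append(word_to_index["<EOS>"])
--         length = 24
--     return result, length + 1
-- ===== SOURCE B (Python) =====
-- def sentence_to_index(sentence, word_to_index):
--     # Fill a fixed 25-slot frame by position: slot i is the i-th mapped word,
--     # then one EOS, then PADs.  No append/extend/truncate branches at all.
--     L = min(len(sentence), 24)
--
--     def slot(i):
--         if i < L:
--             w = sentence[i]
--             return word_to_index[w] if w in word_to_index else word_to_index["<UNK>"]
--         if i == L:
--             return word_to_index["<EOS>"]
--         return word_to_index["<PAD>"]
--
--     return [slot(i) for i in range(25)], L + 1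
-- ===== Notes on version B (the rewrite author's own statement) =====
-- stated objective: simpler
-- what changed: B generates the fixed 25-slot output frame by position (slot i = i-th mapped word, then EOS, then PAD), computing L = min(len(sentence),24) up front, instead of A's accumulator loop with a running length counter followed by a two-branch append/extend vs truncate fixup.
import Mathlib
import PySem

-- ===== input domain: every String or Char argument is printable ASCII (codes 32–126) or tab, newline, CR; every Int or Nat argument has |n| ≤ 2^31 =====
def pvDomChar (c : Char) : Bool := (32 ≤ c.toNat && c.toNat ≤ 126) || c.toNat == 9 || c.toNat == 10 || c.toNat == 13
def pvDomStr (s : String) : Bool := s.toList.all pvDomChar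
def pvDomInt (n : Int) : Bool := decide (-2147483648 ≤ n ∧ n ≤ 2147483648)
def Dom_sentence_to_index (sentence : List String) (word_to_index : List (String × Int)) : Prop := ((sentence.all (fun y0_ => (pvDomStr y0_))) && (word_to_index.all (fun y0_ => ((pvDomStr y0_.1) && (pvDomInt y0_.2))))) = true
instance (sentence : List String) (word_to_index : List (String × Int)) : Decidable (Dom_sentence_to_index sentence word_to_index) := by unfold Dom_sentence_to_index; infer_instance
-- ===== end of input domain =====

-- B fills a fixed 25-slot frame by position (slot i = i-th mapped word, then EOS, then PADs) instead of A's accumulator loop plus two-branch pad/truncate; return-value equivalence on Pre_ (where Python A raises no KeyError).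


-- dict lookup (first match, Python insertion-order dict as assoc list); default 0 is
-- never reached inside Pre_ (Python raises KeyError there, excluded by Pre_)
def pvLook (d : List (String × Int)) (k : String) : Int :=
  ((d.find? (fun p => p.1 == k)).map Prod.snd).getD 0

def pvHas (d : List (String × Int)) (k : String) : Bool :=
  (d.find? (fun p => p.1 == k)).isSome

-- ===== PORT A =====
def sentence_to_index (sentence : List String) (word_to_index : List (String × Int)) : List Int × Int :=
  -- loop: result.append(word_to_index[word] or word_to_index["<UNK>"]); length += 1
  let st := sentence.foldl
    (fun (acc : List Int × Int) word =>
      (acc.1 ++ [if pvHas word_to_index word then pvLook word_to_index word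
                 else pvLook word_to_index "<UNK>"], acc.2 + 1))
    ([], 0)
  let result := st.1
  let length := st.2
  if result.length < 24 then
    let r := result ++ [pvLook word_to_index "<EOS>"]
    let r := r ++ List.replicate (25 - r.length) (pvLook word_to_index "<PAD>")
    (r, length + 1)
  else
    let r := (result.take 24) ++ [pvLook word_to_index "<EOS>"]
    (r, 24 + 1)

-- ===== PORT B =====
-- Source B's helper slot(i): the i-th entry of the fixed 25-slot frame.
-- sentence[i] is ported as getD (exact: slot only reads i < L ≤ len(sentence))
def pvSlot (sentence : List String) (word_to_index : List (String × Int)) (L : Nat) (i : Nat) : Int :=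
  if i < L then
    let w := sentence.getD i ""
    if pvHas word_to_index w then pvLook word_to_index w else pvLook word_to_index "<UNK>"
  else if i == L then pvLook word_to_index "<EOS>"
  else pvLook word_to_index "<PAD>"

def sentence_to_index_alt (sentence : List String) (word_to_index : List (String × Int)) : List Int × Int :=
  let L := min sentence.length 24
  ((List.range 25).map (pvSlot sentence word_to_index L), (L : Int) + 1)

-- ===== PRECONDITION & SPEC =====
-- Pre_ is exactly the inputs on which Python A returns: it raises KeyError when "<EOS>"
-- is absent, when "<PAD>" is absent and the sentence is shorter than 24 words, or when
-- some word and "<UNK>" are both absent from the dict.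
def Pre_sentence_to_index (sentence : List String) (word_to_index : List (String × Int)) : Prop :=
  pvHas word_to_index "<EOS>" = true ∧
  (sentence.length < 24 → pvHas word_to_index "<PAD>" = true) ∧
  (∀ w ∈ sentence, pvHas word_to_index w = true ∨ pvHas word_to_index "<UNK>" = true)
instance (sentence : List String) (word_to_index : List (String × Int)) : Decidable (Pre_sentence_to_index sentence word_to_index) := by unfold Pre_sentence_to_index; infer_instance

def pvWitness_sentence_to_index : List String × (List (String × Int)) :=
  (["hi", "there"], [("hi", 1), ("<EOS>", 2), ("<PAD>", 3), ("<UNK>", 4)])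

def Spec_sentence_to_index (sentence : List String) (word_to_index : List (String × Int)) (out : List Int × Int) : Prop := out = sentence_to_index_alt sentence word_to_index
instance (sentence : List String) (word_to_index : List (String × Int)) (out : List Int × Int) : Decidable (Spec_sentence_to_index sentence word_to_index out) := by unfold Spec_sentence_to_index; infer_instance

-- ===== CLAIM (what is proved, stated in full; the proofs are below) =====
def Claim_equal_sentence_to_index : Prop := ∀ (sentence : List String) (word_to_index : List (String × Int)), Dom_sentence_to_index sentence word_to_index → Pre_sentence_to_index sentence word_to_index → Spec_sentence_to_index sentence word_to_index (sentence_to_index sentence word_to_index)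


-- ===== LEMMAS AND PROOFS =====

-- A's loop is a map with a length counter
theorem foldl_loop_eq (f : String → Int) (sentence : List String) (init : List Int) (n : Int) :
    sentence.foldl (fun (acc : List Int × Int) word => (acc.1 ++ [f word], acc.2 + 1)) (init, n)
      = (init ++ sentence.map f, n + sentence.length) := by
  induction sentence generalizing init n with
  | nil => simp
  | cons x xs ih =>
    simp [List.foldl_cons, ih]
    omega

-- reading the first L slots reproduces the mapped L-word prefix
theorem range_map_getD (g : String → Int) (s : List String) (L : Nat) (hL : L ≤ s.length) :
    (List.range L).map (fun i => g (s.getD i "")) = (s.take L).map g := by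
  apply List.ext_getElem
  · simp [hL]
  · intro i h1 h2
    simp only [List.getElem_map, List.getElem_range, List.getElem_take]
    have : i < s.length := by simp at h2; omega
    simp [List.getD_eq_getElem?_getD, List.getElem?_eq_getElem this]

-- the 25-slot frame, decomposed: mapped prefix, EOS, PADs
theorem frame_eq (s : List String) (d : List (String × Int)) (L : Nat)
    (hL : L ≤ 24) (hLen : L ≤ s.length) :
    (List.range 25).map (pvSlot s d L)
      = (s.take L).map (fun w => if pvHas d w then pvLook d w else pvLook d "<UNK>")
        ++ ([pvLook d "<EOS>"] ++ List.replicate (24 - L) (pvLook d "<PAD>")) := by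
  have h25 : 25 = L + (1 + (24 - L)) := by omega
  rw [h25, List.range_add, List.map_append]
  congr 1
  · rw [← range_map_getD (fun w => if pvHas d w then pvLook d w else pvLook d "<UNK>") s L hLen]
    apply List.map_congr_left
    intro i hi
    simp only [List.mem_range] at hi
    simp [pvSlot, hi]
  · rw [List.map_map, show 1 + (24 - L) = (24 - L) + 1 from Nat.add_comm _ _, List.range_succ_eq_map]
    simp only [List.map_cons, List.singleton_append]
    congr 1
    · simp [pvSlot]
    · rw [List.map_map]
      have hconst : ∀ k ∈ List.range (24 - L),
          ((pvSlot s d L ∘ fun x => L + x) ∘ Nat.succ) k = pvLook d "<PAD>" := by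
        intro k _
        simp only [Function.comp_apply, pvSlot]
        rw [if_neg (by omega), if_neg (by simp)]
      rw [List.map_congr_left hconst]
      simp [List.map_const']

theorem sentence_to_index_spec : Claim_equal_sentence_to_index := by
  intro sentence word_to_index _ _
  unfold Spec_sentence_to_index sentence_to_index sentence_to_index_alt
  rw [foldl_loop_eq]
  simp only [List.nil_append, List.length_map, Int.zero_add]
  by_cases h : sentence.length < 24
  · rw [if_pos h]
    have hL : min sentence.length 24 = sentence.length := by omega
    rw [hL, frame_eq _ _ _ (by omega) (le_refl _), List.take_length]
    apply Prod.ext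
    · rw [List.append_assoc]
      congr 2
      simp
    · rfl
  · rw [if_neg h]
    have hL : min sentence.length 24 = 24 := by omega
    rw [hL, frame_eq _ _ _ (le_refl _) (by omega)]
    apply Prod.ext
    · simp [List.map_take]
    · rfl

-- ===== VERDICT (by name: the statement is the Claim_ definition above) =====
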